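-- pv_equiv track=rewrite | github.com/allforeco/twiff | src/twiff/utils/geodata.py | clean_zip_static
-- ===== SOURCE A (Python) =====
-- def clean_zip_static(name_with_zip):
--     def is_clean_word_static(word):
--         tipp = "0123456789()"
--         for ch in word:
--             if ch in tipp:
--                 return False
--         return True
--
--     name_words = name_with_zip.split(" ")
--     clean_name = []
--     # We don't want words containing these characters
--     for name_word in name_words:
--         if is_clean_word_static(name_word):
--             clean_name += [name_word]
--     return " ".join([w for w in clean_name if w != ''])
-- ===== SOURCE B (Python) =====
-- def clean_zip_static(name_with_zip):
--     bad = "0123456789()"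
--     out = []
--     buf = []
--     dirty = False
--     for ch in name_with_zip:
--         if ch == ' ':
--             if buf and not dirty:
--                 out.append(''.join(buf))
--             buf = []
--             dirty = False
--         else:
--             buf.append(ch)
--             dirty = dirty or (ch in bad)
--     if buf and not dirty:
--         out.append(''.join(buf))
--     return ' '.join(out)
-- ===== Notes on version B (the rewrite author's own statement) =====
-- stated objective: alternative
-- what changed: Replaced the split/filter/filter/join pipeline with a single character pass that maintains a word buffer and a dirty flag, emitting only non-empty clean words.
import Mathlib
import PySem

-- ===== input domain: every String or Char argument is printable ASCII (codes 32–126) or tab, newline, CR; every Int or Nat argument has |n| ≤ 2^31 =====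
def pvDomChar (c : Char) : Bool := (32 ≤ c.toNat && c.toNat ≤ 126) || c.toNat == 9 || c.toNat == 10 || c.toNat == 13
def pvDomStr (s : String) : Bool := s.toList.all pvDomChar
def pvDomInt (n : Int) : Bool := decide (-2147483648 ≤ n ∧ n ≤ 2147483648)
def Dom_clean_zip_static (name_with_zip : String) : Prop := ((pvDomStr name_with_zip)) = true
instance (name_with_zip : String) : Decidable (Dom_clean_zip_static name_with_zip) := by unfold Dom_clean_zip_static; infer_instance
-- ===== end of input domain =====

-- B replaces split/filter/join with one buffered character pass (different decomposition, same cost).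

-- ===== PORT A =====
def aTipp : List Char := "0123456789()".toList

def is_clean_word_static : List Char → Bool
  | [] => true
  | ch :: rest => if aTipp.contains ch then false else is_clean_word_static rest

def clean_zip_static (name_with_zip : String) : String :=
  let name_words := PySem.Chars.splitOn name_with_zip.toList [' ']
  let clean_name :=
    name_words.foldl (fun acc w => if is_clean_word_static w then acc ++ [w] else acc) []
  String.mk (PySem.Chars.join [' '] (clean_name.filter (fun w => w ≠ [])))

-- ===== PORT B =====
def bBad : List Char := "0123456789()".toList

def bFlush (out : List (List Char)) (buf : List Char) (dirty : Bool) : List (List Char) :=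
  if buf ≠ [] ∧ dirty = false then out ++ [buf] else out

def bGo : List Char → List Char → Bool → List (List Char) → List (List Char)
  | [], buf, dirty, out => bFlush out buf dirty
  | ch :: rest, buf, dirty, out =>
    if ch = ' ' then bGo rest [] false (bFlush out buf dirty)
    else bGo rest (buf ++ [ch]) (dirty || bBad.contains ch) out

def clean_zip_static_alt (name_with_zip : String) : String :=
  String.mk (PySem.Chars.join [' '] (bGo name_with_zip.toList [] false []))

-- ===== PRECONDITION & SPEC =====
def Spec_clean_zip_static (name_with_zip : String) (out : String) : Prop := out = clean_zip_static_alt name_with_zip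
instance (name_with_zip : String) (out : String) : Decidable (Spec_clean_zip_static name_with_zip out) := by unfold Spec_clean_zip_static; infer_instance

-- ===== CLAIM (what is proved, stated in full; the proofs are below) =====
def Claim_equal_clean_zip_static : Prop := ∀ (name_with_zip : String), Dom_clean_zip_static name_with_zip → Spec_clean_zip_static name_with_zip (clean_zip_static name_with_zip)

-- ===== LEMMAS AND PROOFS =====

/-- Left-to-right specification of splitting on a single space. -/
def splitAcc (buf : List Char) : List Char → List (List Char)
  | [] => [buf]
  | c :: cs => if c = ' ' then buf :: splitAcc [] cs else splitAcc (buf ++ [c]) cs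

theorem go_spec (fuel : Nat) : ∀ (l cur : List Char) (res : List (List Char)),
    l.length ≤ fuel →
    PySem.Chars.splitOn.go [' '] fuel l cur res = res.reverse ++ splitAcc cur.reverse l := by
  induction fuel with
  | zero =>
    intro l cur res h
    have hl : l = [] := by
      cases l with
      | nil => rfl
      | cons a b => simp at h
    subst hl
    simp [PySem.Chars.splitOn.go, splitAcc]
  | succ n ih =>
    intro l cur res h
    cases l with
    | nil => simp [PySem.Chars.splitOn.go, splitAcc]
    | cons c rest =>
      by_cases hc : c = ' '
      · subst hc
        have hp : ([' '] : List Char).isPrefixOf (' ' :: rest) = true := by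
          simp [List.isPrefixOf]
        rw [PySem.Chars.splitOn.go, if_pos hp]
        simp only [List.length_singleton, List.drop_succ_cons, List.drop_zero]
        rw [ih rest [] (cur.reverse :: res) (by simp at h ⊢; omega)]
        simp [splitAcc]
      · have hp : ([' '] : List Char).isPrefixOf (c :: rest) = false := by
          simp [List.isPrefixOf]
          exact fun e => hc e.symm
        rw [PySem.Chars.splitOn.go, if_neg (by simp [hp])]
        rw [ih rest (c :: cur) res (by simp at h ⊢; omega)]
        simp [splitAcc, hc]

theorem splitOn_eq_splitAcc (l : List Char) :
    PySem.Chars.splitOn l [' '] = splitAcc [] l := by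
  show PySem.Chars.splitOn.go [' '] (l.length + 1) l [] [] = splitAcc [] l
  have h := go_spec (l.length + 1) l [] [] (by omega)
  simpa using h

theorem isClean_append (buf : List Char) (c : Char) :
    is_clean_word_static (buf ++ [c]) = (is_clean_word_static buf && !bBad.contains c) := by
  induction buf with
  | nil => simp [is_clean_word_static, aTipp, bBad]
  | cons x xs ih => by_cases h : aTipp.contains x <;> simp [is_clean_word_static, h, ih, Bool.and_assoc]

def goodWord (w : List Char) : Bool := (!w.isEmpty) && is_clean_word_static w

theorem bGo_spec (l : List Char) : ∀ (buf : List Char) (out : List (List Char)),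
    bGo l buf (!is_clean_word_static buf) out = out ++ (splitAcc buf l).filter goodWord := by
  induction l with
  | nil =>
    intro buf out
    by_cases hb : buf = []
    · subst hb; simp [bGo, bFlush, splitAcc, goodWord, is_clean_word_static]
    · by_cases hcl : is_clean_word_static buf
      · simp [bGo, bFlush, splitAcc, goodWord, hb, hcl]
      · simp [bGo, bFlush, splitAcc, goodWord, hb, Bool.eq_false_iff.mpr hcl,
          List.isEmpty_eq_false_iff.mpr hb]
  | cons c rest ih =>
    intro buf out
    by_cases hc : c = ' '
    · subst hc
      have h0 : (false : Bool) = !is_clean_word_static [] := by simp [is_clean_word_static]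
      simp only [bGo]
      rw [if_pos trivial, h0, ih [] (bFlush out buf (!is_clean_word_static buf))]
      by_cases hb : buf = []
      · subst hb; simp [bFlush, splitAcc, goodWord]
      · by_cases hcl : is_clean_word_static buf
        · simp [bFlush, splitAcc, goodWord, hb, hcl, List.isEmpty_eq_false_iff.mpr hb]
        · simp [bFlush, splitAcc, goodWord, hb, Bool.eq_false_iff.mpr hcl,
            List.isEmpty_eq_false_iff.mpr hb]
    · simp only [bGo, if_neg hc]
      have hd : (!is_clean_word_static buf || bBad.contains c)
          = !is_clean_word_static (buf ++ [c]) := by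
        rw [isClean_append]; cases is_clean_word_static buf <;> simp
      rw [hd, ih (buf ++ [c]) out]
      simp [splitAcc, hc]

theorem foldl_filter (ws : List (List Char)) (acc : List (List Char)) :
    ws.foldl (fun acc w => if is_clean_word_static w then acc ++ [w] else acc) acc
      = acc ++ ws.filter is_clean_word_static := by
  induction ws generalizing acc with
  | nil => simp
  | cons w rest ih => by_cases h : is_clean_word_static w <;> simp [h, ih]

-- ===== VERDICT (by name: the statement is the Claim_ definition above) =====
theorem clean_zip_static_spec : Claim_equal_clean_zip_static := by
  intro s _
  unfold Spec_clean_zip_static clean_zip_static clean_zip_static_alt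
  have hfalse : (false : Bool) = !is_clean_word_static [] := by simp [is_clean_word_static]
  simp only [splitOn_eq_splitAcc, foldl_filter]
  rw [hfalse, bGo_spec]
  simp only [List.nil_append, List.filter_filter]
  congr 2
  apply List.filter_congr
  intro w _
  cases hw : w.isEmpty
  · simp [List.isEmpty_eq_false_iff.mp hw, goodWord, hw, Bool.and_comm]
  · simp [List.isEmpty_iff.mp hw, goodWord, is_clean_word_static]
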